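-- pv_equiv track=rewrite | github.com/Elanthingal/interview-coding-problems | problems/Advisor360/round2.py | mixMatch
-- ===== SOURCE A (Python) =====
-- def mixMatch(A):
--
--     ilen = max([len(x) for x in A])
--     s = { x:iter(x) for x in A}
--     out = ""
--     for idx in range(ilen):
--         for idx in s.keys():
--             try:
--                 out += next(s[idx])
--             except:
--                 pass
--     return out
-- ===== SOURCE B (Python) =====
-- def mixMatch(A):
--     return _weave(list(dict.fromkeys(A)))
--
-- def _weave(cols):
--     cols = [x for x in cols if x]
--     if not cols:
--         return ""
--     return ''.join(x[0] for x in cols) + _weave([x[1:] for x in cols])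
-- ===== Notes on version B (the rewrite author's own statement) =====
-- stated objective: alternative
-- what changed: Replaces the dict-of-iterators with next()/try-except inside an indexed column loop by a recursive transpose: dedupe once, then repeatedly emit the first character of every remaining nonempty string and recurse on the tails, with no length computation or indexing at all.
import Mathlib
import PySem

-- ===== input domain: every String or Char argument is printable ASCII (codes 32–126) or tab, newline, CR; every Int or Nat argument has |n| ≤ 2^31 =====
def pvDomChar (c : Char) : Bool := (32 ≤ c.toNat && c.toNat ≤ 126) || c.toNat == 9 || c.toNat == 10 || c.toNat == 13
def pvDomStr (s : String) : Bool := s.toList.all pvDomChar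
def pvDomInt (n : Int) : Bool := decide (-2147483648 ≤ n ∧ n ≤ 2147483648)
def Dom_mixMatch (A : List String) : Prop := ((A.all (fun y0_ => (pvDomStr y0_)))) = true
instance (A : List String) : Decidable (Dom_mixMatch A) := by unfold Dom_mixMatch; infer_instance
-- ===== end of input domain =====

-- B replaces A's dict-of-iterators + next()/try-except inside an indexed column loop by a
-- recursive transpose over the deduplicated list (objective: alternative decomposition).

-- ===== PORT A =====
-- one column pass: iterate over the dict's keys, out += next(iterator) if not exhausted
def mixMatchStep (st : PySem.Dict String (List Char) × List Char) :
    PySem.Dict String (List Char) × List Char :=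
  (PySem.Dict.keys st.1).foldl (fun st k =>
    match PySem.Dict.get? st.1 k with
    | some (c :: rest) => (PySem.Dict.insert st.1 k rest, st.2 ++ [c])
    | _ => st) st      -- StopIteration (or missing key, impossible): pass

def mixMatch (A : List String) : String :=
  match PySem.List.max? (A.map (fun x => PySem.Str.len x)) (fun v => v) with
  | none => ""        -- max([]) raises ValueError; excluded by Pre_mixMatch
  | some ilen =>
    let s : PySem.Dict String (List Char) :=
      A.foldl (fun d x => PySem.Dict.insert d x x.toList) (PySem.Dict.mk [])
    let res := (PySem.List.pyRange 0 ilen 1).foldl (fun st _ => mixMatchStep st) (s, [])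
    String.mk res.2

-- ===== PORT B =====
-- [x for x in cols if x]
def pvKeep : List (List Char) → List (List Char)
  | [] => []
  | x :: r => if x.isEmpty then pvKeep r else x :: pvKeep r

-- [x[1:] for x in cols]
def pvTails : List (List Char) → List (List Char)
  | [] => []
  | x :: r => x.tail :: pvTails r

-- ''.join(x[0] for x in cols); every x here is nonempty
def pvHeads : List (List Char) → List Char
  | [] => []
  | x :: r => x.headD ' ' :: pvHeads r

-- termination lemmas for the recursive transpose (cited by decreasing_by below)
theorem pvKeep_eq (t : List (List Char)) : pvKeep t = t.filter (fun x => !x.isEmpty) := by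
  induction t with
  | nil => rfl
  | cons a r ih =>
    by_cases ha : a.isEmpty <;> simp [pvKeep, ha, ih]

theorem pvTails_eq (t : List (List Char)) : pvTails t = t.map List.tail := by
  induction t with
  | nil => rfl
  | cons a r ih => simp [pvTails, ih]

theorem pvTailsLe (t : List (List Char)) :
    (((t.filter (fun x => !x.isEmpty)).map List.tail).map List.length).sum
      ≤ (t.map List.length).sum := by
  induction t with
  | nil => simp
  | cons a r ih =>
    by_cases ha : a.isEmpty
    · simp only [List.filter_cons, ha, Bool.not_true, Bool.false_eq_true, if_false,
        List.map_cons, List.sum_cons]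
      omega
    · have ha' : (!a.isEmpty) = true := by simp [ha]
      simp only [List.filter_cons, ha', if_true, List.map_cons, List.sum_cons, List.length_tail]
      omega

theorem pvWeaveDec (cols : List (List Char))
    (h : ¬ (pvKeep cols).isEmpty) :
    ((pvTails (pvKeep cols)).map List.length).sum < (cols.map List.length).sum := by
  rw [pvKeep_eq] at h ⊢
  rw [pvTails_eq]
  induction cols with
  | nil => simp at h
  | cons a r ih =>
    by_cases ha : a.isEmpty
    · simp only [List.filter_cons, ha, Bool.not_true, Bool.false_eq_true, if_false] at h ⊢
      have := ih h
      simp only [List.map_cons, List.sum_cons]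
      omega
    · have ha' : (!a.isEmpty) = true := by simp [ha]
      have hlen : 0 < a.length := by
        cases a with
        | nil => simp at ha
        | cons _ _ => simp
      simp only [List.filter_cons, ha', if_true, List.map_cons, List.sum_cons, List.length_tail]
      have := pvTailsLe r
      omega

-- _weave: emit the first char of every remaining nonempty string, recurse on the tails
def pvWeave (cols : List (List Char)) : List Char :=
  if (pvKeep cols).isEmpty then []
  else pvHeads (pvKeep cols) ++ pvWeave (pvTails (pvKeep cols))
termination_by (cols.map List.length).sum
decreasing_by rename_i h; exact pvWeaveDec cols h

def mixMatch_alt (A : List String) : String :=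
  String.mk (pvWeave ((PySem.List.dedup A).map String.toList))

-- ===== PRECONDITION & SPEC =====
-- Pre_ excludes only the empty list, on which the Python A raises ValueError in max().
def Pre_mixMatch (A : List String) : Prop := A ≠ []
instance (A : List String) : Decidable (Pre_mixMatch A) := by unfold Pre_mixMatch; infer_instance
def pvWitness_mixMatch : List String := (["abc", "de", "abc", "f"])

def Spec_mixMatch (A : List String) (out : String) : Prop := out = mixMatch_alt A
instance (A : List String) (out : String) : Decidable (Spec_mixMatch A out) := by unfold Spec_mixMatch; infer_instance

-- ===== CLAIM (what is proved, stated in full; the proofs are below) =====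
def Claim_equal_mixMatch : Prop := ∀ (A : List String), Dom_mixMatch A → Pre_mixMatch A → Spec_mixMatch A (mixMatch A)

-- ===== LEMMAS AND PROOFS =====

-- the initial dict of A
theorem pvGet?_foldl_insert_not_mem (l : List String) (d : PySem.Dict String (List Char))
    (x : String) (hx : x ∉ l) :
    (l.foldl (fun d x => PySem.Dict.insert d x x.toList) d).get? x = d.get? x := by
  induction l generalizing d with
  | nil => rfl
  | cons a t ih =>
    simp only [List.mem_cons, not_or] at hx
    simp only [List.foldl_cons]
    rw [ih _ hx.2, PySem.Dict.get?_insert_of_ne _ _ hx.1]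

theorem pvGet?_foldl_insert_mem (l : List String) (d : PySem.Dict String (List Char))
    (x : String) (hx : x ∈ l) :
    (l.foldl (fun d x => PySem.Dict.insert d x x.toList) d).get? x = some x.toList := by
  induction l generalizing d with
  | nil => cases hx
  | cons a t ih =>
    simp only [List.foldl_cons]
    by_cases hxt : x ∈ t
    · exact ih _ hxt
    · have hxa : x = a := (List.mem_cons.mp hx).resolve_right hxt
      subst hxa
      rw [pvGet?_foldl_insert_not_mem _ _ _ hxt, PySem.Dict.get?_insert_self]

theorem pvKeysD0 (A : List String) :
    (A.foldl (fun d x => PySem.Dict.insert d x x.toList) (PySem.Dict.mk [])).keys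
      = PySem.List.dedup A := by
  rw [PySem.Dict.keys_foldl_insert]
  simp [PySem.List.dedup_eq_ofList, PySem.Set.update, PySem.Set.ofList_eq_foldl,
    PySem.Dict.keys_mk]

-- one column pass of A
theorem pvStepAux (rem : String → List Char) :
    ∀ (ks : List String) (d : PySem.Dict String (List Char)) (out : List Char),
    ks.Nodup → (∀ k ∈ ks, d.get? k = some (rem k)) →
    ∃ d',
      ks.foldl (fun st k =>
        match PySem.Dict.get? st.1 k with
        | some (c :: rest) => (PySem.Dict.insert st.1 k rest, st.2 ++ [c])
        | _ => st) (d, out)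
        = (d', out ++ ks.filterMap (fun k => (rem k).head?)) ∧
      (∀ k, d'.get? k = if k ∈ ks then some ((rem k).tail) else d.get? k) ∧
      d'.keys = d.keys := by
  intro ks
  induction ks with
  | nil => intro d out _ _; exact ⟨d, by simp, by simp, rfl⟩
  | cons a t ih =>
    intro d out hnd hget
    have hnd' := hnd
    rw [List.nodup_cons] at hnd'
    have hga : d.get? a = some (rem a) := hget a (List.mem_cons_self)
    cases hra : rem a with
    | nil =>
      obtain ⟨d', h1, h2, h3⟩ := ih d (out) hnd'.2
        (fun k hk => hget k (List.mem_cons_of_mem _ hk))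
      refine ⟨d', ?_, ?_, h3⟩
      · simp only [List.foldl_cons, hga, hra, List.filterMap_cons]
        simpa [hra] using h1
      · intro k
        by_cases hka : k = a
        · subst hka
          rw [h2 k, if_neg hnd'.1]
          simp [hga, hra]
        · rw [h2 k]
          simp [hka]
    | cons c rest =>
      have hcont : (PySem.Dict.insert d a rest).get? a = some rest :=
        PySem.Dict.get?_insert_self ..
      obtain ⟨d', h1, h2, h3⟩ := ih (PySem.Dict.insert d a rest) (out ++ [c]) hnd'.2
        (fun k hk => by
          rw [PySem.Dict.get?_insert_of_ne _ _ (fun he => hnd'.1 (by rwa [he] at hk))]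
          exact hget k (List.mem_cons_of_mem _ hk))
      refine ⟨d', ?_, ?_, ?_⟩
      · simp only [List.foldl_cons, hga, hra, List.filterMap_cons]
        simpa [hra] using h1
      · intro k
        by_cases hka : k = a
        · subst hka
          rw [h2 k, if_neg hnd'.1, hcont]
          simp [hra]
        · rw [h2 k]
          by_cases hkt : k ∈ t
          · simp [hkt, hka]
          · simp only [List.mem_cons, hka, hkt, or_self, if_false]
            exact PySem.Dict.get?_insert_of_ne _ _ hka
      · rw [h3]
        apply PySem.Dict.keys_insert_of_contains
        rw [PySem.Dict.contains_eq_isSome_get?, hga]; rfl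

-- range(0, b) as a mapped Nat range
theorem pvRangeZero (b : Int) :
    PySem.List.pyRange 0 b 1 = List.map Int.ofNat (List.range b.toNat) := by
  rw [PySem.List.pyRange_one]
  simp [Int.ofNat_eq_natCast]

-- A's main loop, characterised column by column: after m columns the output is the
-- concatenation, over j < m, of the j-th characters of the deduplicated strings
theorem pvMain (A : List String) (m : Nat) :
    ((List.map Int.ofNat (List.range m)).foldl
        (fun st _ => mixMatchStep st)
        (A.foldl (fun d x => PySem.Dict.insert d x x.toList) (PySem.Dict.mk []), ([] : List Char))).2
      = (List.range m).flatMap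
          (fun j => (PySem.List.dedup A).filterMap (fun x => x.toList[j]?))
    ∧ ((List.map Int.ofNat (List.range m)).foldl
        (fun st _ => mixMatchStep st)
        (A.foldl (fun d x => PySem.Dict.insert d x x.toList) (PySem.Dict.mk []), ([] : List Char))).1.keys
      = PySem.List.dedup A
    ∧ ∀ x ∈ PySem.List.dedup A,
      ((List.map Int.ofNat (List.range m)).foldl
        (fun st _ => mixMatchStep st)
        (A.foldl (fun d x => PySem.Dict.insert d x x.toList) (PySem.Dict.mk []), ([] : List Char))).1.get? x
        = some (x.toList.drop m) := by
  induction m with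
  | zero =>
    refine ⟨rfl, pvKeysD0 A, ?_⟩
    intro x hx
    simp only [List.range_zero, List.map_nil, List.foldl_nil, List.drop_zero]
    exact pvGet?_foldl_insert_mem A _ x (by rwa [← PySem.List.mem_dedup])
  | succ m ih =>
    obtain ⟨ihout, ihkeys, ihget⟩ := ih
    set L := List.map Int.ofNat (List.range m) with hL
    set st := L.foldl (fun st _ => mixMatchStep st)
      (A.foldl (fun d x => PySem.Dict.insert d x x.toList) (PySem.Dict.mk []), ([] : List Char)) with hst
    have hsplit : List.map Int.ofNat (List.range (m+1)) = L ++ [Int.ofNat m] := by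
      rw [List.range_succ, List.map_append]; rfl
    rw [hsplit, List.foldl_append]
    simp only [List.foldl_cons, List.foldl_nil]
    obtain ⟨d', h1, h2, h3⟩ := pvStepAux (fun x => x.toList.drop m) (st.1.keys) st.1 st.2
      (ihkeys ▸ PySem.List.nodup_dedup A)
      (fun k hk => ihget k (ihkeys ▸ hk))
    have hstep : mixMatchStep st = (d', st.2 ++ (PySem.List.dedup A).filterMap
        (fun x => (x.toList.drop m).head?)) := by
      rw [mixMatchStep]
      rw [show (st.1, st.2) = st from rfl] at h1
      rw [h1, ihkeys]
    refine ⟨?_, ?_, ?_⟩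
    · rw [hstep]
      simp only [List.range_succ, List.flatMap_append, List.flatMap_cons, List.flatMap_nil,
        List.append_nil, ← ihout]
      congr 1
      apply List.filterMap_congr
      intro x _
      rw [List.head?_drop]
    · rw [hstep]
      simpa [ihkeys] using h3
    · intro x hx
      rw [hstep]
      simp only
      rw [h2 x, ihkeys, if_pos hx, List.tail_drop]

-- B's column 0: the heads of the nonempty lists, in order
theorem pvCol0 (cols : List (List Char)) :
    cols.filterMap (fun x => x[0]?) = pvHeads (pvKeep cols) := by
  induction cols with
  | nil => rfl
  | cons a t ih =>
    cases a with
    | nil => simpa [pvKeep] using ih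
    | cons c r => simpa [pvKeep, pvHeads] using ih

-- B's column j+1 over cols = column j over the tails of the kept lists
theorem pvColSucc (cols : List (List Char)) (j : Nat) :
    cols.filterMap (fun x => x[j+1]?)
      = (pvTails (pvKeep cols)).filterMap (fun x => x[j]?) := by
  induction cols with
  | nil => rfl
  | cons a t ih =>
    cases a with
    | nil => simpa [pvKeep] using ih
    | cons c r =>
      simp only [pvKeep, List.isEmpty_cons, Bool.false_eq_true, if_false, pvTails,
        List.tail_cons, List.filterMap_cons, List.getElem?_cons_succ]
      rw [ih]

-- the recursive transpose, characterised column by column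
theorem pvWeaveEq : ∀ (n : Nat) (cols : List (List Char)),
    (∀ x ∈ cols, x.length ≤ n) →
    pvWeave cols = (List.range n).flatMap (fun j => cols.filterMap (fun x => x[j]?)) := by
  intro n
  induction n with
  | zero =>
    intro cols hlen
    have hnil : ∀ x ∈ cols, x = [] := fun x hx =>
      List.length_eq_zero_iff.mp (Nat.le_zero.mp (hlen x hx))
    rw [pvWeave, pvKeep_eq]
    have hfil : cols.filter (fun x => !x.isEmpty) = [] := by
      rw [List.filter_eq_nil_iff]
      intro x hx
      simp [hnil x hx]
    simp [hfil]
  | succ n ih =>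
    intro cols hlen
    rw [pvWeave]
    by_cases hcs : (pvKeep cols).isEmpty
    · rw [if_pos hcs]
      rw [pvKeep_eq, List.isEmpty_iff, List.filter_eq_nil_iff] at hcs
      have hnil : ∀ x ∈ cols, x = [] := by
        intro x hx
        have := hcs x hx
        simpa [List.isEmpty_iff] using this
      symm
      apply List.flatMap_eq_nil_iff.mpr
      intro j _
      apply List.filterMap_eq_nil_iff.mpr
      intro x hx
      simp [hnil x hx]
    · rw [if_neg hcs]
      have hrec := ih (pvTails (pvKeep cols))
        (by
          intro x hx
          rw [pvTails_eq, pvKeep_eq] at hx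
          obtain ⟨y, hy, rfl⟩ := List.mem_map.mp hx
          have hyc : y ∈ cols := (List.mem_filter.mp hy).1
          have := hlen y hyc
          simp only [List.length_tail]
          omega)
      rw [hrec, List.range_succ_eq_map, List.flatMap_cons, pvCol0]
      congr 1
      rw [List.flatMap_map]
      apply List.flatMap_congr
      intro j _
      exact (pvColSucc cols j).symm

-- ===== VERDICT (by name: the statement is the Claim_ definition above) =====
theorem mixMatch_spec : Claim_equal_mixMatch := by
  intro A _ _
  unfold Spec_mixMatch mixMatch mixMatch_alt
  cases hmax : PySem.List.max? (A.map (fun x => PySem.Str.len x)) (fun v => v) with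
  | none =>
    rw [PySem.List.max?_eq_none_iff] at hmax
    have hA : A = [] := by simpa using hmax
    subst hA
    rw [show PySem.List.dedup ([] : List String) = [] from rfl]
    rw [show ([] : List String).map String.toList = [] from rfl]
    rw [pvWeave]
    rfl
  | some ilen =>
    simp only
    rw [pvRangeZero, (pvMain A ilen.toNat).1]
    rw [pvWeaveEq ilen.toNat ((PySem.List.dedup A).map String.toList)
      (by
        intro l hl
        obtain ⟨x, hx, rfl⟩ := List.mem_map.mp hl
        have hxA : x ∈ A := by rwa [PySem.List.mem_dedup] at hx
        have := PySem.List.max?_isMax hmax (PySem.Str.len x)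
          (List.mem_map.mpr ⟨x, hxA, rfl⟩)
        have hlen : PySem.Str.len x = (x.toList.length : Int) := by simp [PySem.Str.len]
        omega)]
    congr 1
    apply List.flatMap_congr
    intro j _
    rw [List.filterMap_map]
    rfl
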